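-- pv_equiv track=rewrite | github.com/Arcadia-Science/growth-curve-calculator | growth_curve_calculator/parse_SpectraMax_xml.py | forward_fill_indices
-- ===== SOURCE A (Python) =====
-- def forward_fill_indices(str_indices: list[str | None]) -> list[int]:
--     """Forward fill a list of string indices with first index position as 0.
--
--     Args:
--         str_indices: A list of indices as string representations of integers mixed and None.
--
--     Returns:
--         int_indices: A list of forward filled indices as integers starting at 0.
--
--     Examples:
--         >>> forward_fill_indices(["5", None, None])
--         [0, 1, 2]
--         >>> forward_fill_indices([None, "3", None])
--         [0, 3, 4]
--         >>> forward_fill_indices([None, None, None])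
--         [0, 1, 2]
--     """
--     int_indices = [0]
--     for i in str_indices[1:]:
--         if i is not None:
--             int_indices.append(int(i))
--         else:
--             int_indices.append(int_indices[-1] + 1)
--
--     return int_indices
-- ===== SOURCE B (Python) =====
-- def forward_fill_indices(str_indices):
--     """Forward fill by run-length segmentation: collect (start_value, run_length)
--     segments in one pass, then expand each segment to a consecutive range."""
--     segments = [(0, 1)]
--     for s in str_indices[1:]:
--         if s is None:
--             start, length = segments[-1]
--             segments[-1] = (start, length + 1)
--         else:
--             segments.append((int(s), 1))
--     return [v for start, length in segments for v in range(start, start + length)]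
-- ===== Notes on version B (the rewrite author's own statement) =====
-- stated objective: alternative
-- what changed: B replaces A's element-wise append loop (which re-reads the last output element) with a run-length encoding: one pass collects (start_value, run_length) anchor segments, which are then expanded into consecutive ranges.
import Mathlib
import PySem

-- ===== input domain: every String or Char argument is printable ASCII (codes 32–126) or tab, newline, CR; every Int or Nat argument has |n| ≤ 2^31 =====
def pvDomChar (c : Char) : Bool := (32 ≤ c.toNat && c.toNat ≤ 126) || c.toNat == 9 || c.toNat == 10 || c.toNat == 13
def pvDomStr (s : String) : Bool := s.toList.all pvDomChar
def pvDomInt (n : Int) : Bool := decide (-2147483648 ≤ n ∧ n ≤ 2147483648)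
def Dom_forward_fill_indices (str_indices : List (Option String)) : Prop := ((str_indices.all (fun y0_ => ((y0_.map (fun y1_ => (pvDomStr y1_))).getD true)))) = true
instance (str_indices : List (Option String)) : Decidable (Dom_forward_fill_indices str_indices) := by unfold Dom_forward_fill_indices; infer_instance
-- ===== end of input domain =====

-- B builds run-length (start_value, run_length) segments and expands them to ranges,
-- instead of A's element-wise appends that re-read the last output element.

-- ===== PORT A =====
def forward_fill_indices (str_indices : List (Option String)) : List Int :=
  (PySem.List.slice str_indices (some 1) none).foldl
    (fun int_indices i =>
      match i with
      | some s => int_indices ++ [(PySem.Int.ofStr? s).getD 0]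
      | none => int_indices ++ [(PySem.List.pyGet? int_indices (-1)).getD 0 + 1])
    [0]

-- ===== PORT B =====
def forward_fill_indices_alt (str_indices : List (Option String)) : List Int :=
  let segments : List (Int × Int) :=
    (PySem.List.slice str_indices (some 1) none).foldl
      (fun segments s =>
        match s with
        | none =>
          -- segments[-1] = (start, length + 1); segments is never empty, the none branch is unreachable
          match segments.getLast? with
          | some (start, length) => segments.dropLast ++ [(start, length + 1)]
          | none => segments
        | some t => segments ++ [((PySem.Int.ofStr? t).getD 0, 1)])
      [(0, 1)]
  segments.flatMap (fun seg => PySem.List.pyRange seg.1 (seg.1 + seg.2) 1)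

-- ===== PRECONDITION & SPEC =====
-- Pre_ excludes inputs on which A raises ValueError: an element after the first that is a
-- string int() cannot parse (B raises there too).
def Pre_forward_fill_indices (str_indices : List (Option String)) : Prop :=
  ∀ x ∈ str_indices.tail, ∀ s, x = some s → (PySem.Int.ofStr? s).isSome = true
instance (str_indices : List (Option String)) : Decidable (Pre_forward_fill_indices str_indices) := by
  unfold Pre_forward_fill_indices; infer_instance
def pvWitness_forward_fill_indices : List (Option String) := [none, some "3", none]

def Spec_forward_fill_indices (str_indices : List (Option String)) (out : List Int) : Prop := out = forward_fill_indices_alt str_indices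
instance (str_indices : List (Option String)) (out : List Int) : Decidable (Spec_forward_fill_indices str_indices out) := by unfold Spec_forward_fill_indices; infer_instance

-- ===== CLAIM (what is proved, stated in full; the proofs are below) =====
def Claim_equal_forward_fill_indices : Prop := ∀ (str_indices : List (Option String)), Dom_forward_fill_indices str_indices → Pre_forward_fill_indices str_indices → Spec_forward_fill_indices str_indices (forward_fill_indices str_indices)

-- ===== LEMMAS AND PROOFS =====

-- The common core: the forward-filled values after the leading 0, carrying the previous value.
def ffiG (prev : Int) : List (Option String) → List Int
  | [] => []
  | some s :: t => (PySem.Int.ofStr? s).getD 0 :: ffiG ((PySem.Int.ofStr? s).getD 0) t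
  | none :: t => (prev + 1) :: ffiG (prev + 1) t

-- A's loop, generalized: the accumulator always ends in the previous value.
theorem ffi_foldlA (l : List (Option String)) :
    ∀ (init : List Int) (prev : Int),
      l.foldl (fun int_indices i =>
        match i with
        | some s => int_indices ++ [(PySem.Int.ofStr? s).getD 0]
        | none => int_indices ++ [(PySem.List.pyGet? int_indices (-1)).getD 0 + 1])
        (init ++ [prev])
      = (init ++ [prev]) ++ ffiG prev l := by
  induction l with
  | nil => intro init prev; simp [ffiG]
  | cons x t ih =>
    intro init prev
    cases x with
    | some s =>
      simp only [List.foldl_cons, ffiG]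
      rw [ih (init ++ [prev]) _]
      simp
    | none =>
      simp only [List.foldl_cons, ffiG, PySem.List.pyGet?_neg_one_append_singleton init prev,
        Option.getD_some]
      rw [ih (init ++ [prev]) _]
      simp

-- B's loop, generalized: expanding the segments built so far plus the open (a, b) run.
theorem ffi_foldlB (l : List (Option String)) :
    ∀ (init : List (Int × Int)) (a b : Int), 0 < b →
      (l.foldl (fun segments s =>
        match s with
        | none =>
          match segments.getLast? with
          | some (start, length) => segments.dropLast ++ [(start, length + 1)]
          | none => segments
        | some t => segments ++ [((PySem.Int.ofStr? t).getD 0, 1)])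
        (init ++ [(a, b)])).flatMap (fun seg => PySem.List.pyRange seg.1 (seg.1 + seg.2) 1)
      = init.flatMap (fun seg => PySem.List.pyRange seg.1 (seg.1 + seg.2) 1)
          ++ PySem.List.pyRange a (a + b) 1 ++ ffiG (a + b - 1) l := by
  induction l with
  | nil => intro init a b _; simp [ffiG]
  | cons x t ih =>
    intro init a b hb
    cases x with
    | some s =>
      simp only [List.foldl_cons, ffiG]
      rw [ih (init ++ [(a, b)]) _ 1 (by omega)]
      simp only [List.flatMap_append, List.flatMap_cons, List.flatMap_nil, List.append_nil]
      rw [PySem.List.pyRange_one_singleton]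
      simp
    | none =>
      simp only [List.foldl_cons, List.getLast?_concat, List.dropLast_concat]
      rw [ih init a (b + 1) (by omega)]
      have h1 : a + (b + 1) = (a + b) + 1 := by ring
      have h2 : PySem.List.pyRange a (a + b + 1) 1 = PySem.List.pyRange a (a + b) 1 ++ [a + b] := by
        exact PySem.List.pyRange_one_succ_right (by omega)
      rw [h1, h2]
      simp only [ffiG]
      have h3 : a + b - 1 + 1 = a + b := by ring
      rw [h3]
      simp

-- ===== VERDICT (by name: the statement is the Claim_ definition above) =====
theorem forward_fill_indices_spec : Claim_equal_forward_fill_indices := by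
  intro xs _ _
  unfold Spec_forward_fill_indices forward_fill_indices forward_fill_indices_alt
  have hA := ffi_foldlA (PySem.List.slice xs (some 1) none) [] 0
  have hB := ffi_foldlB (PySem.List.slice xs (some 1) none) [] 0 1 (by omega)
  simp only [List.nil_append] at hA hB
  rw [hA, hB]
  rw [PySem.List.pyRange_one_singleton]
  norm_num
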